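-- pv_equiv track=rewrite | github.com/TDTU-K25/discrete-structures | Lab/version1/Lab04/Lab04.py | ex3_c
-- ===== SOURCE A (Python) =====
-- import itertools
--
-- truths = list(itertools.product([0, 1], repeat=3))
--
-- def ex3_c(truths):
--     truth_table_p_and_q_and_notR = []
--     truth_table_not_notP_or_notQ_and_r = []
--
--     for item in truths:
--         if item[0] == 1:
--             a = True
--         else:
--             a = False
--
--         if item[1] == 1:
--             b = True
--         else:
--             b = False
--
--         if item[2] == 1:
--             c = True
--         else:
--             c = False
--
--         truth_table_p_and_q_and_notR.append(a and b and not (c))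
--         truth_table_not_notP_or_notQ_and_r.append(
--             not (not (a) or not (b)) and c)
--
--     isEquivalent = True
--     for i in range(len(truth_table_p_and_q_and_notR)):
--         if (truth_table_p_and_q_and_notR[i] != truth_table_not_notP_or_notQ_and_r[i]):
--             isEquivalent = False
--             break
--
--     return isEquivalent
-- ===== SOURCE B (Python) =====
-- def ex3_c(truths):
--     # Single pass: evaluate both formulas per row and return False on first disagreement.
--     for item in truths:
--         a = item[0] == 1
--         b = item[1] == 1
--         c = item[2] == 1
--         if (a and b and not c) != (not (not a or not b) and c):
--             return False
--     return True
-- ===== Notes on version B (the rewrite author's own statement) =====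
-- stated objective: simpler
-- what changed: Fuses A's two-table build plus separate comparison scan into one early-returning pass that evaluates both formulas per row, keeping no intermediate lists.
import Mathlib
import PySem

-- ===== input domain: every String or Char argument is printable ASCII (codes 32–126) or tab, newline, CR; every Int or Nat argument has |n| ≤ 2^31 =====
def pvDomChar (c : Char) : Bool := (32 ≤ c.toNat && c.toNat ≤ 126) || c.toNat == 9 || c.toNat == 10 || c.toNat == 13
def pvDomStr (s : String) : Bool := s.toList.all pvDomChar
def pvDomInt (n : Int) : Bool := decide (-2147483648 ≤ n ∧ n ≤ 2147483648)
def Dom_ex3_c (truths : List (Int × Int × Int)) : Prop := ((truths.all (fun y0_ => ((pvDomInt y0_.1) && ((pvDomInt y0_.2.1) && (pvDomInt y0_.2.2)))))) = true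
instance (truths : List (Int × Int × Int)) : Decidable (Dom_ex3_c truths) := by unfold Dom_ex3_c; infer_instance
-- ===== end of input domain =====

-- B fuses A's two-table build and separate comparison scan into one early-returning pass (objective: simpler).

-- ===== PORT A =====
-- step of A's first loop: append each formula's value to its truth table
def ex3_cStep (acc : List Bool × List Bool) (item : Int × Int × Int) : List Bool × List Bool :=
  let a := if item.1 = 1 then true else false
  let b := if item.2.1 = 1 then true else false
  let c := if item.2.2 = 1 then true else false
  (acc.1 ++ [a && b && !c], acc.2 ++ [!(!a || !b) && c])

-- A's second loop: walk the two tables in step, stop at the first disagreement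
def ex3_cScan : List Bool → List Bool → Bool
  | x :: xs, y :: ys => if x ≠ y then false else ex3_cScan xs ys
  | _, _ => true

def ex3_c (truths : List (Int × Int × Int)) : Bool :=
  let tables := truths.foldl ex3_cStep ([], [])
  ex3_cScan tables.1 tables.2

-- ===== PORT B =====
def ex3_c_alt : List (Int × Int × Int) → Bool
  | [] => true
  | item :: rest =>
    let a := item.1 == 1
    let b := item.2.1 == 1
    let c := item.2.2 == 1
    if (a && b && !c) ≠ (!(!a || !b) && c) then false else ex3_c_alt rest

-- ===== PRECONDITION & SPEC =====
def Spec_ex3_c (truths : List (Int × Int × Int)) (out : Bool) : Prop := out = ex3_c_alt truths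
instance (truths : List (Int × Int × Int)) (out : Bool) : Decidable (Spec_ex3_c truths out) := by unfold Spec_ex3_c; infer_instance

-- ===== CLAIM (what is proved, stated in full; the proofs are below) =====
def Claim_equal_ex3_c : Prop := ∀ (truths : List (Int × Int × Int)), Dom_ex3_c truths → Spec_ex3_c truths (ex3_c truths)

-- ===== LEMMAS AND PROOFS =====
def ex3_cF1 (item : Int × Int × Int) : Bool :=
  (if item.1 = 1 then true else false) && (if item.2.1 = 1 then true else false) && !(if item.2.2 = 1 then true else false)

def ex3_cF2 (item : Int × Int × Int) : Bool :=
  !(!(if item.1 = 1 then true else false) || !(if item.2.1 = 1 then true else false)) && (if item.2.2 = 1 then true else false)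

theorem ex3_c_fold (truths : List (Int × Int × Int)) (l1 l2 : List Bool) :
    truths.foldl ex3_cStep (l1, l2) = (l1 ++ truths.map ex3_cF1, l2 ++ truths.map ex3_cF2) := by
  induction truths generalizing l1 l2 with
  | nil => simp
  | cons t ts ih => simp [ex3_cStep, ih, ex3_cF1, ex3_cF2]

theorem ex3_c_scan_maps (truths : List (Int × Int × Int)) :
    ex3_cScan (truths.map ex3_cF1) (truths.map ex3_cF2) = ex3_c_alt truths := by
  induction truths with
  | nil => rfl
  | cons t ts ih =>
    simp only [List.map, ex3_cScan, ex3_c_alt, ih, ex3_cF1, ex3_cF2]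
    rcases t with ⟨x, y, z⟩
    by_cases hx : x = 1 <;> by_cases hy : y = 1 <;> by_cases hz : z = 1 <;>
      simp [beq_eq_decide, hx, hy, hz]

-- ===== VERDICT (by name: the statement is the Claim_ definition above) =====
theorem ex3_c_spec : Claim_equal_ex3_c := by
  intro truths _
  unfold Spec_ex3_c ex3_c
  rw [ex3_c_fold]
  simpa using ex3_c_scan_maps truths
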